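-- pv_equiv track=rewrite | github.com/Athish49/alzheimers_kg | graph_rag/graph_to_text.py | summarize_genes_proteins
-- ===== SOURCE A (Python) =====
-- from typing import Dict, List, Tuple, Optional
--
-- def _safe_str(x: object) -> str:
--     """Return a safe string representation (avoid 'None')."""
--     if x is None:
--         return ""
--     return str(x)
--
-- def _dedupe_preserve_order(items: List[str]) -> List[str]:
--     """Simple stable de-duplication."""
--     seen = set()
--     out: List[str] = []
--     for it in items:
--         if it not in seen:
--             seen.add(it)
--             out.append(it)
--     return out
--
-- def summarize_genes_proteins(
--     genes_proteins: List[Dict[str, object]],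
--     max_items: int = 15,
-- ) -> str:
--     """
--     Summarize a small subset of Gene -> Protein relationships.
--
--     Input rows:
--
--         {
--             "gene_id": ...,
--             "gene_symbol": ...,
--             "protein_id": ...,
--             "protein_label": ...,
--         }
--
--     The idea is to give the LLM a flavor of the molecular layer
--     without flooding the context.
--     """
--     if not genes_proteins:
--         return "No Gene -> Protein encoding relationships were found.\n"
--
--     lines: List[str] = []
--     lines.append("### Example Gene → Protein relationships")
--     lines.append(
--         "These pairs illustrate genes and the proteins they encode, "
--         "drawn from the Alzheimer-related knowledge graph."
--     )
--     lines.append("")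
--
--     # Prefer well-known AD genes if present
--     preferred_prefixes = ("APOE", "APP", "MAPT", "PSEN1", "PSEN2")
--     preferred: List[str] = []
--     others: List[str] = []
--
--     for row in genes_proteins:
--         gene_symbol = _safe_str(row.get("gene_symbol")) or _safe_str(row.get("gene_id"))
--         protein_label = _safe_str(row.get("protein_label")) or _safe_str(
--             row.get("protein_id")
--         )
--         if not gene_symbol or not protein_label:
--             continue
--
--         line = f"- Gene {gene_symbol} encodes protein {protein_label}."
--         if any(gene_symbol.upper().startswith(pref) for pref in preferred_prefixes):
--             preferred.append(line)
--         else: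
--             others.append(line)
--
--     ordered = _dedupe_preserve_order(preferred) + _dedupe_preserve_order(others)
--     for line in ordered[:max_items]:
--         lines.append(line)
--     lines.append("")
--
--     return "\n".join(lines).rstrip() + "\n"
-- ===== SOURCE B (Python) =====
-- def summarize_genes_proteins(genes_proteins, max_items=15):
--     if not genes_proteins:
--         return "No Gene -> Protein encoding relationships were found.\n"
--
--     tagged = []
--     for row in genes_proteins:
--         gene = row.get("gene_symbol", "") or row.get("gene_id", "")
--         protein = row.get("protein_label", "") or row.get("protein_id", "")
--         if gene and protein:
--             rank = 0 if gene.upper().startswith(("APOE", "APP", "MAPT", "PSEN1", "PSEN2")) else 1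
--             tagged.append((rank, f"- Gene {gene} encodes protein {protein}."))
--
--     # stable sort brings preferred lines first, keeping input order per group;
--     # dict.fromkeys dedupes the tagged pairs preserving first occurrence
--     ordered = list(dict.fromkeys(sorted(tagged, key=lambda t: t[0])))
--     body = [line for _, line in ordered][:max_items]
--
--     return "\n".join(
--         [
--             "### Example Gene → Protein relationships",
--             "These pairs illustrate genes and the proteins they encode, "
--             "drawn from the Alzheimer-related knowledge graph.",
--             "",
--         ]
--         + body
--         + [""]
--     ).rstrip() + "\n"
-- ===== Notes on version B (the rewrite author's own statement) =====
-- stated objective: alternative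
-- what changed: A partitions rows into two bucket lists and dedupes each with a hand-rolled seen-set helper; B builds one (priority, line) tagged list in a single pass, orders it with a stable sorted(key=priority) and dedupes once via dict.fromkeys.
import Mathlib
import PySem

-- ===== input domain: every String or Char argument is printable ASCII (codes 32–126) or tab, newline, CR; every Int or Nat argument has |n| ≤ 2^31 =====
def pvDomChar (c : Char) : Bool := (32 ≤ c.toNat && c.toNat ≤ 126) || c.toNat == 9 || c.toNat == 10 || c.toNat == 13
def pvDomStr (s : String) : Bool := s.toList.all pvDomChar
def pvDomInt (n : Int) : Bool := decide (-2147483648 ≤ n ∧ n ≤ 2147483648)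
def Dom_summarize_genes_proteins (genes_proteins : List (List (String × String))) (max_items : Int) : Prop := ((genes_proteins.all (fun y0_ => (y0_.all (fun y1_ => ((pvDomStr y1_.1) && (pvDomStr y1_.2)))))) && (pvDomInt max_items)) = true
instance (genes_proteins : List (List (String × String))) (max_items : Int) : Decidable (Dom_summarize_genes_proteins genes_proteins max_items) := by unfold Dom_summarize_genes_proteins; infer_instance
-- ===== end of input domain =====

-- B replaces A's two-bucket partition + per-bucket seen-set dedup by one tagged list,
-- a stable sort on the 0/1 priority and a single dict.fromkeys dedup (objective: alternative, same cost).

-- ===== PORT A =====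
-- _safe_str(row.get(k)): the dict values here are strings, so None (missing key) becomes "" and a string stays itself
def pvASafeGet (row : List (String × String)) (k : String) : String :=
  (PySem.Dict.get? (PySem.Dict.mk row) k).getD ""

-- Python 'x or y' on strings: y exactly when x is falsy ("")
def pvAOr (x y : String) : String := if x = "" then y else x

def pvPreferredPrefixes : List String := ["APOE", "APP", "MAPT", "PSEN1", "PSEN2"]

-- A's _dedupe_preserve_order: seen-set plus output list
def pvDedupeStep (st : PySem.Set String × List String) (it : String) : PySem.Set String × List String :=
  if PySem.Set.contains st.1 it then st else (PySem.Set.add st.1 it, st.2 ++ [it])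

def pvDedupePreserveOrder (items : List String) : List String :=
  (items.foldl pvDedupeStep (PySem.Set.empty, [])).2

-- body of A's row loop: append the line to preferred (st.1) or others (st.2)
def pvAStep (st : List String × List String) (row : List (String × String)) : List String × List String :=
  let gene_symbol := pvAOr (pvASafeGet row "gene_symbol") (pvASafeGet row "gene_id")
  let protein_label := pvAOr (pvASafeGet row "protein_label") (pvASafeGet row "protein_id")
  if gene_symbol = "" ∨ protein_label = "" then st
  else
    let line := "- Gene " ++ gene_symbol ++ " encodes protein " ++ protein_label ++ "."
    if pvPreferredPrefixes.any (fun pref => PySem.Str.startswith (PySem.Str.upper gene_symbol) pref)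
    then (st.1 ++ [line], st.2)
    else (st.1, st.2 ++ [line])

def summarize_genes_proteins (genes_proteins : List (List (String × String))) (max_items : Int) : String :=
  if genes_proteins = [] then "No Gene -> Protein encoding relationships were found.\n"
  else
    let lines0 : List String :=
      ["### Example Gene → Protein relationships",
       "These pairs illustrate genes and the proteins they encode, drawn from the Alzheimer-related knowledge graph.",
       ""]
    let po := genes_proteins.foldl pvAStep ([], [])
    let ordered := pvDedupePreserveOrder po.1 ++ pvDedupePreserveOrder po.2
    let lines := lines0 ++ PySem.List.slice ordered none (some max_items) ++ [""]
    PySem.Str.rstrip (PySem.Str.join "\n" lines) ++ "\n"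

-- ===== PORT B =====
-- Python 'x or y' on strings: y exactly when x is falsy ("")
def pvBOr (x y : String) : String := if x = "" then y else x

-- row.get(k, "")
def pvBGet (row : List (String × String)) (k : String) : String :=
  (PySem.Dict.get? (PySem.Dict.mk row) k).getD ""

-- gene.upper().startswith((p1, …, pn)): Python's tuple startswith = startswith on any component
def pvBRank (gene : String) : Int :=
  if (["APOE", "APP", "MAPT", "PSEN1", "PSEN2"].any
       (fun p => PySem.Str.startswith (PySem.Str.upper gene) p)) then 0 else 1

-- body of B's row loop: append one (rank, line) pair
def pvBStep (acc : List (Int × String)) (row : List (String × String)) : List (Int × String) :=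
  let gene := pvBOr (pvBGet row "gene_symbol") (pvBGet row "gene_id")
  let protein := pvBOr (pvBGet row "protein_label") (pvBGet row "protein_id")
  if gene ≠ "" ∧ protein ≠ "" then
    acc ++ [(pvBRank gene, "- Gene " ++ gene ++ " encodes protein " ++ protein ++ ".")]
  else acc

def summarize_genes_proteins_alt (genes_proteins : List (List (String × String))) (max_items : Int) : String :=
  if genes_proteins = [] then "No Gene -> Protein encoding relationships were found.\n"
  else
    let tagged := genes_proteins.foldl pvBStep []
    -- sorted(tagged, key=lambda t: t[0]) then list(dict.fromkeys(...))
    let ordered := PySem.List.dedup (PySem.List.sorted tagged (fun t => t.1) false)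
    let body := PySem.List.slice (ordered.map (fun t => t.2)) none (some max_items)
    PySem.Str.rstrip (PySem.Str.join "\n"
      (["### Example Gene → Protein relationships",
        "These pairs illustrate genes and the proteins they encode, drawn from the Alzheimer-related knowledge graph.",
        ""] ++ body ++ [""])) ++ "\n"

-- ===== PRECONDITION & SPEC =====
def Spec_summarize_genes_proteins (genes_proteins : List (List (String × String))) (max_items : Int) (out : String) : Prop := out = summarize_genes_proteins_alt genes_proteins max_items
instance (genes_proteins : List (List (String × String))) (max_items : Int) (out : String) : Decidable (Spec_summarize_genes_proteins genes_proteins max_items out) := by unfold Spec_summarize_genes_proteins; infer_instance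

-- ===== CLAIM (what is proved, stated in full; the proofs are below) =====
def Claim_equal_summarize_genes_proteins : Prop := ∀ (genes_proteins : List (List (String × String))) (max_items : Int), Dom_summarize_genes_proteins genes_proteins max_items → Spec_summarize_genes_proteins genes_proteins max_items (summarize_genes_proteins genes_proteins max_items)

-- ===== LEMMAS AND PROOFS =====

theorem pvBGet_eq : pvBGet = pvASafeGet := rfl

theorem pvBOr_eq : pvBOr = pvAOr := rfl

-- A's seen-set loop keeps exactly the first occurrences: its state is always (s, s) as lists
theorem pvDedupe_aux (items : List String) : ∀ (s : PySem.Set String),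
    items.foldl pvDedupeStep (s, s) = (PySem.Set.update s items, PySem.Set.update s items) := by
  induction items with
  | nil => intro s; simp [PySem.Set.update]
  | cons it items ih =>
    intro s
    rw [List.foldl_cons, PySem.Set.update_cons]
    by_cases h : it ∈ s
    · have hc : PySem.Set.contains s it = true := (PySem.Set.contains_iff s it).mpr h
      have hstep : pvDedupeStep (s, s) it = (s, s) := by simp [pvDedupeStep, h]
      rw [hstep, ih, PySem.Set.add_of_mem h]
    · have hc : PySem.Set.contains s it = false := by
        cases hcc : PySem.Set.contains s it
        · rfl
        · exact absurd ((PySem.Set.contains_iff s it).mp hcc) h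
      have hstep : pvDedupeStep (s, s) it = (PySem.Set.add s it, PySem.Set.add s it) := by
        simp [pvDedupeStep, h]
      rw [hstep, ih]

theorem pvDedupe_eq_dedup (items : List String) :
    pvDedupePreserveOrder items = PySem.List.dedup items := by
  unfold pvDedupePreserveOrder
  have h0 : (PySem.Set.empty, ([] : List String))
      = ((PySem.Set.empty : PySem.Set String), (PySem.Set.empty : PySem.Set String)) := rfl
  rw [h0, pvDedupe_aux items PySem.Set.empty, PySem.List.dedup_eq_ofList, ← PySem.Set.update_empty]

-- inserting x into f0 ++ f1 with x after everything in f0 and before everything in f1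
theorem pvInsertBy_split (x : Int × String) :
    ∀ (f0 f1 : List (Int × String)), (∀ y ∈ f0, ¬ x.1 < y.1) → (∀ y ∈ f1, x.1 < y.1) →
    PySem.List.insertBy (fun a b => decide (a.1 < b.1)) x (f0 ++ f1) = f0 ++ x :: f1 := by
  intro f0
  induction f0 with
  | nil =>
    intro f1 _ h1
    cases f1 with
    | nil => simp [PySem.List.insertBy]
    | cons y ys => simp [PySem.List.insertBy, h1 y (by simp)]
  | cons z f0' ih =>
    intro f1 h0 h1
    have hz : ¬ x.1 < z.1 := h0 z (by simp)
    simp only [List.cons_append, PySem.List.insertBy, decide_eq_true_eq, if_neg hz]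
    rw [ih f1 (fun y hy => h0 y (by simp [hy])) h1]

-- the stable insertion sort keeps the two priority groups in input order
theorem pvFoldlInsert_split :
    ∀ (xs f0 f1 : List (Int × String)), (∀ p ∈ xs, p.1 = 0 ∨ p.1 = 1) →
    (∀ p ∈ f0, p.1 = 0) → (∀ p ∈ f1, p.1 = 1) →
    xs.foldl (fun acc x => PySem.List.insertBy (fun a b => decide (a.1 < b.1)) x acc) (f0 ++ f1)
      = (f0 ++ xs.filter (fun p => p.1 == 0)) ++ (f1 ++ xs.filter (fun p => p.1 == 1)) := by
  intro xs
  induction xs with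
  | nil => intro f0 f1 _ _ _; simp
  | cons x xs ih =>
    intro f0 f1 hx h0 h1
    rw [List.foldl_cons]
    rcases hx x (by simp) with hx0 | hx1
    · have hins : PySem.List.insertBy (fun a b => decide (a.1 < b.1)) x (f0 ++ f1)
          = (f0 ++ [x]) ++ f1 := by
        rw [pvInsertBy_split x f0 f1
          (fun y hy => by rw [hx0, h0 y hy]; omega)
          (fun y hy => by rw [hx0, h1 y hy]; omega)]
        simp
      have h0' : ∀ p ∈ f0 ++ [x], p.1 = 0 := by
        intro p hp
        rcases List.mem_append.mp hp with h | h
        · exact h0 p h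
        · simp at h; rw [h, hx0]
      rw [hins, ih (f0 ++ [x]) f1 (fun p hp => hx p (by simp [hp])) h0' h1]
      have e0 : List.filter (fun p => p.1 == 0) (x :: xs)
          = x :: List.filter (fun p => p.1 == 0) xs := by simp [hx0]
      have e1 : List.filter (fun p => p.1 == 1) (x :: xs)
          = List.filter (fun p => p.1 == 1) xs := by simp [hx0]
      rw [e0, e1]
      simp [List.append_assoc]
    · have hins : PySem.List.insertBy (fun a b => decide (a.1 < b.1)) x ((f0 ++ f1) ++ [])
          = (f0 ++ f1) ++ x :: [] := by
        apply pvInsertBy_split x (f0 ++ f1) []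
        · intro y hy
          rcases List.mem_append.mp hy with h | h
          · rw [hx1, h0 y h]; omega
          · rw [hx1, h1 y h]; omega
        · intro y hy; simp at hy
      simp only [List.append_nil] at hins
      have h1' : ∀ p ∈ f1 ++ [x], p.1 = 1 := by
        intro p hp
        rcases List.mem_append.mp hp with h | h
        · exact h1 p h
        · simp at h; rw [h, hx1]
      rw [hins, List.append_assoc f0 f1 [x], ih f0 (f1 ++ [x]) (fun p hp => hx p (by simp [hp])) h0 h1']
      have e0 : List.filter (fun p => p.1 == 0) (x :: xs)
          = List.filter (fun p => p.1 == 0) xs := by simp [hx1]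
      have e1 : List.filter (fun p => p.1 == 1) (x :: xs)
          = x :: List.filter (fun p => p.1 == 1) xs := by simp [hx1]
      rw [e0, e1]
      simp [List.append_assoc]

-- sorted on a 0/1 key = the 0-group then the 1-group, each in input order
theorem pvSorted_binary (xs : List (Int × String)) (hx : ∀ p ∈ xs, p.1 = 0 ∨ p.1 = 1) :
    PySem.List.sorted xs (fun t => t.1) false
      = xs.filter (fun p => p.1 == 0) ++ xs.filter (fun p => p.1 == 1) := by
  rw [PySem.List.sorted_eq_foldl_insertBy]
  have h := pvFoldlInsert_split xs [] [] hx (by simp) (by simp)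
  simpa using h

-- dedup distributes over an append of element-disjoint lists
theorem pvDedup_append_disjoint (u v : List (Int × String))
    (h : ∀ a ∈ u, ∀ b ∈ v, a ≠ b) :
    PySem.List.dedup (u ++ v) = PySem.List.dedup u ++ PySem.List.dedup v := by
  simp only [PySem.List.dedup_eq_ofList]
  rw [PySem.Set.ofList_append, PySem.Set.update_eq_append_filter]
  congr 1
  apply List.filter_eq_self.mpr
  intro b hb
  have hbv : b ∈ v := (PySem.Set.mem_ofList v b).mp hb
  cases hcc : PySem.Set.contains (PySem.Set.ofList u) b
  · rfl
  · have hbu : b ∈ PySem.Set.ofList u := (PySem.Set.contains_iff _ b).mp hcc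
    exact absurd rfl (h b ((PySem.Set.mem_ofList u b).mp hbu) b hbv)

-- on a constant-priority list, dedup of the pairs projects to dedup of the lines
theorem pvDedup_map_snd (c : Int) :
    ∀ (w : List (Int × String)), (∀ p ∈ w, p.1 = c) →
    (PySem.List.dedup w).map (fun t => t.2) = PySem.List.dedup (w.map (fun t => t.2)) := by
  intro w
  induction w with
  | nil => intro _; simp [PySem.List.dedup]
  | cons x xs ih =>
    intro h
    simp only [PySem.List.dedup_eq_ofList] at *
    rw [List.map_cons, PySem.Set.ofList_cons, PySem.Set.ofList_cons, List.map_cons]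
    congr 1
    rw [← ih (fun p hp => h p (by simp [hp]))]
    unfold PySem.Set.discard
    rw [List.filter_map]
    congr 1
    apply List.filter_congr
    intro p hp
    have hpc : p.1 = c := h p (List.mem_cons_of_mem x ((PySem.Set.mem_ofList xs p).mp hp))
    have hxc : x.1 = c := h x (by simp)
    rcases p with ⟨p1, p2⟩; rcases x with ⟨x1, x2⟩
    simp only [Function.comp_apply] at *
    have hfst : p1 = x1 := by rw [hpc, hxc]
    subst hfst
    simp [Prod.ext_iff]

-- B's loop body over an arbitrary accumulator
theorem pvBStep_acc (acc : List (Int × String)) (r : List (String × String)) :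
    pvBStep acc r = acc ++ pvBStep [] r := by
  by_cases hc : pvBOr (pvBGet r "gene_symbol") (pvBGet r "gene_id") ≠ ""
      ∧ pvBOr (pvBGet r "protein_label") (pvBGet r "protein_id") ≠ ""
  · simp [pvBStep, hc]
  · simp [pvBStep, hc]

theorem pvBfold_acc : ∀ (gp : List (List (String × String))) (acc : List (Int × String)),
    gp.foldl pvBStep acc = acc ++ gp.foldl pvBStep [] := by
  intro gp
  induction gp with
  | nil => simp
  | cons r gp ih =>
    intro acc
    rw [List.foldl_cons, List.foldl_cons, ih (pvBStep acc r), ih (pvBStep [] r),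
        pvBStep_acc acc r, List.append_assoc]

-- every tagged pair has priority 0 or 1
theorem pvBStep_fst (r : List (String × String)) (p : Int × String)
    (hp : p ∈ pvBStep [] r) : p.1 = 0 ∨ p.1 = 1 := by
  by_cases hc : pvBOr (pvBGet r "gene_symbol") (pvBGet r "gene_id") ≠ ""
      ∧ pvBOr (pvBGet r "protein_label") (pvBGet r "protein_id") ≠ ""
  · simp only [pvBStep, if_pos hc, List.nil_append, List.mem_singleton] at hp
    rw [hp]
    unfold pvBRank
    split_ifs <;> simp
  · simp [pvBStep, hc] at hp

theorem pvTagged_fst : ∀ (gp : List (List (String × String))) (p : Int × String),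
    p ∈ gp.foldl pvBStep [] → p.1 = 0 ∨ p.1 = 1 := by
  intro gp
  induction gp with
  | nil => simp
  | cons r gp ih =>
    intro p hp
    rw [List.foldl_cons, pvBfold_acc gp (pvBStep [] r)] at hp
    rcases List.mem_append.mp hp with h | h
    · exact pvBStep_fst r p h
    · exact ih p h

-- A's two buckets are the projections of the two priority groups of B's tagged list
theorem pvAB_fold : ∀ (gp : List (List (String × String))) (P O : List String),
    gp.foldl pvAStep (P, O)
      = (P ++ ((gp.foldl pvBStep []).filter (fun p => p.1 == 0)).map (fun t => t.2),
         O ++ ((gp.foldl pvBStep []).filter (fun p => p.1 == 1)).map (fun t => t.2)) := by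
  intro gp
  induction gp with
  | nil => intro P O; simp
  | cons r gp ih =>
    intro P O
    rw [List.foldl_cons, List.foldl_cons, pvBfold_acc gp (pvBStep [] r)]
    by_cases hg : pvAOr (pvASafeGet r "gene_symbol") (pvASafeGet r "gene_id") = ""
        ∨ pvAOr (pvASafeGet r "protein_label") (pvASafeGet r "protein_id") = ""
    · have hA : pvAStep (P, O) r = (P, O) := by simp [pvAStep, hg]
      have hB : pvBStep [] r = [] := by
        have hc : ¬ (pvBOr (pvBGet r "gene_symbol") (pvBGet r "gene_id") ≠ ""
            ∧ pvBOr (pvBGet r "protein_label") (pvBGet r "protein_id") ≠ "") := by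
          rw [pvBOr_eq, pvBGet_eq]; tauto
        simp [pvBStep, hc]
      rw [hA, hB, List.nil_append, ih P O]
    · rw [not_or] at hg
      have hc : pvBOr (pvBGet r "gene_symbol") (pvBGet r "gene_id") ≠ ""
          ∧ pvBOr (pvBGet r "protein_label") (pvBGet r "protein_id") ≠ "" := by
        rw [pvBOr_eq, pvBGet_eq]; exact hg
      have hgor : ¬ (pvAOr (pvASafeGet r "gene_symbol") (pvASafeGet r "gene_id") = ""
          ∨ pvAOr (pvASafeGet r "protein_label") (pvASafeGet r "protein_id") = "") := by tauto
      by_cases hpref : (pvPreferredPrefixes.any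
          (fun pref => PySem.Str.startswith
            (PySem.Str.upper (pvAOr (pvASafeGet r "gene_symbol") (pvASafeGet r "gene_id"))) pref)) = true
      · have hA : pvAStep (P, O) r
            = (P ++ ["- Gene " ++ pvAOr (pvASafeGet r "gene_symbol") (pvASafeGet r "gene_id")
                ++ " encodes protein " ++ pvAOr (pvASafeGet r "protein_label") (pvASafeGet r "protein_id") ++ "."], O) := by
          simp only [pvAStep]
          rw [if_neg hgor, if_pos hpref]
        have hrank : pvBRank (pvAOr (pvASafeGet r "gene_symbol") (pvASafeGet r "gene_id")) = 0 := by
          unfold pvBRank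
          rw [if_pos (by simpa only [pvPreferredPrefixes] using hpref)]
        have hB : pvBStep [] r
            = [((0 : Int), "- Gene " ++ pvAOr (pvASafeGet r "gene_symbol") (pvASafeGet r "gene_id")
                ++ " encodes protein " ++ pvAOr (pvASafeGet r "protein_label") (pvASafeGet r "protein_id") ++ ".")] := by
          simp only [pvBStep, pvBOr_eq, pvBGet_eq, List.nil_append]
          rw [if_pos hg, hrank]
        rw [hA, hB, ih (P ++ [_]) O]
        simp [List.append_assoc]
      · have hpf : (pvPreferredPrefixes.any
            (fun pref => PySem.Str.startswith
              (PySem.Str.upper (pvAOr (pvASafeGet r "gene_symbol") (pvASafeGet r "gene_id"))) pref)) = false := by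
          simpa using hpref
        have hA : pvAStep (P, O) r
            = (P, O ++ ["- Gene " ++ pvAOr (pvASafeGet r "gene_symbol") (pvASafeGet r "gene_id")
                ++ " encodes protein " ++ pvAOr (pvASafeGet r "protein_label") (pvASafeGet r "protein_id") ++ "."]) := by
          simp only [pvAStep]
          rw [if_neg hgor, hpf]
          simp
        have hrank : pvBRank (pvAOr (pvASafeGet r "gene_symbol") (pvASafeGet r "gene_id")) = 1 := by
          unfold pvBRank
          rw [show ((["APOE", "APP", "MAPT", "PSEN1", "PSEN2"].any
            (fun p => PySem.Str.startswith
              (PySem.Str.upper (pvAOr (pvASafeGet r "gene_symbol") (pvASafeGet r "gene_id"))) p)) = false) from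
            (by simpa only [pvPreferredPrefixes] using hpf)]
          simp
        have hB : pvBStep [] r
            = [((1 : Int), "- Gene " ++ pvAOr (pvASafeGet r "gene_symbol") (pvASafeGet r "gene_id")
                ++ " encodes protein " ++ pvAOr (pvASafeGet r "protein_label") (pvASafeGet r "protein_id") ++ ".")] := by
          simp only [pvBStep, pvBOr_eq, pvBGet_eq, List.nil_append]
          rw [if_pos hg, hrank]
        rw [hA, hB, ih P (O ++ [_])]
        simp [List.append_assoc]

-- ===== VERDICT (by name: the statement is the Claim_ definition above) =====
theorem summarize_genes_proteins_spec : Claim_equal_summarize_genes_proteins := by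
  intro gp m _
  unfold Spec_summarize_genes_proteins
  unfold summarize_genes_proteins summarize_genes_proteins_alt
  by_cases hgp : gp = []
  · simp [hgp]
  · simp only [if_neg hgp]
    have h0 : ∀ p ∈ (gp.foldl pvBStep []).filter (fun p => p.1 == 0), p.1 = (0 : Int) := by
      intro p hp; simpa using (List.mem_filter.mp hp).2
    have h1 : ∀ p ∈ (gp.foldl pvBStep []).filter (fun p => p.1 == 1), p.1 = (1 : Int) := by
      intro p hp; simpa using (List.mem_filter.mp hp).2
    have hdisj : ∀ a ∈ (gp.foldl pvBStep []).filter (fun p => p.1 == 0),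
        ∀ b ∈ (gp.foldl pvBStep []).filter (fun p => p.1 == 1), a ≠ b := by
      intro a ha b hb hab
      have ha0 := h0 a ha
      have hb1 := h1 b hb
      rw [hab, hb1] at ha0
      exact absurd ha0 (by norm_num)
    have key : pvDedupePreserveOrder (gp.foldl pvAStep ([], [])).1
          ++ pvDedupePreserveOrder (gp.foldl pvAStep ([], [])).2
        = (PySem.List.dedup (PySem.List.sorted (gp.foldl pvBStep []) (fun t => t.1) false)).map (fun t => t.2) := by
      rw [pvSorted_binary _ (pvTagged_fst gp), pvDedup_append_disjoint _ _ hdisj, List.map_append,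
          pvDedup_map_snd 0 _ h0, pvDedup_map_snd 1 _ h1, pvAB_fold gp [] []]
      simp [pvDedupe_eq_dedup]
    rw [key]
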